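-- pv_equiv track=rewrite | github.com/eitan-davis/computersProject_eitan_davis | parse_row.py | revile_indexes
-- ===== SOURCE A (Python) =====
-- from typing import List
--
-- labale_X  = 'x'
--
-- labale_Y  = 'y'
--
-- labale_dX = 'dx'
--
-- labale_dY = 'dy'
--
-- def revile_indexes(lines_vars: List[List[str]]):
--
--     index_x, index_dx, index_y, index_dy = -1, -1, -1, -1
--
--     for line_vas in enumerate(lines_vars):
--
--         #has all the indexes been defined, if so return the result
--         if index_x != -1  and index_dx != -1 and index_y != -1 and index_dy != -1:
--             return index_x, index_dx, index_y, index_dy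
--
--         labale = line_vas[1][0].lower()
--
--         if   labale == labale_X  and index_x  == -1:
--             index_x = line_vas[0]
--
--         elif labale == labale_dX and index_dx == -1:
--             index_dx = line_vas[0]
--
--         elif labale == labale_Y  and index_y  == -1:
--             index_y = line_vas[0]
--
--         elif labale == labale_dY and index_dy == -1:
--             index_dy = line_vas[0]
--
--      # making shor the the resolt would be retured
--     return index_x, index_dx, index_y, index_dy
-- ===== SOURCE B (Python) =====
-- def revile_indexes(lines_vars):
--     def first(label):
--         return next((i for i, line in enumerate(lines_vars)
--                      if line[0].lower() == label), -1)
--     return first('x'), first('dx'), first('y'), first('dy')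
-- ===== Notes on version B (the rewrite author's own statement) =====
-- stated objective: simpler
-- what changed: Replaces A's single fused pass with four scalar accumulators, sequential elif chain and early-exit by four independent lazy first-match scans (one per label) via next(... enumerate ...), with no mutable state.
import Mathlib
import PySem

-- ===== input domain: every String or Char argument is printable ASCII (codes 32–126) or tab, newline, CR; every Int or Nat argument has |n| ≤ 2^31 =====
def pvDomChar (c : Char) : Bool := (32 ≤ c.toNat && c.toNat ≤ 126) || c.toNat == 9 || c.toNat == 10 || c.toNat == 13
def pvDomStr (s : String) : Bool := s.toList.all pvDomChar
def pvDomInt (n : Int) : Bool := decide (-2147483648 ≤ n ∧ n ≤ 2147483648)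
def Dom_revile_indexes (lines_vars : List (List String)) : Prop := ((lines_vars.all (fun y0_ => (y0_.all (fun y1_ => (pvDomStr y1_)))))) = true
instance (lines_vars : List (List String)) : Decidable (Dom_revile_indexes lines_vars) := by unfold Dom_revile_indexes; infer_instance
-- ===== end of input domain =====

-- B replaces A's fused single pass with four scalar accumulators and early-exit by four
-- independent first-match scans, one per label (objective: simpler).


-- ===== PORT A =====
-- line_vas[1][0].lower(); `[0]` on an empty line raises IndexError in Python: totalized with
-- getD "" here, those inputs are excluded by Pre_revile_indexes.
def pvLabel (line : List String) : String :=
  PySem.Str.lower ((PySem.List.pyGet? line 0).getD "")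

-- the `for line_vas in enumerate(lines_vars)` loop of A, state = the four accumulators
def pvALoop : List (Int × List String) → Int → Int → Int → Int → Int × Int × Int × Int
  | [], ix, idx, iy, idy => (ix, idx, iy, idy)
  | (i, line) :: rest, ix, idx, iy, idy =>
    if ix ≠ -1 ∧ idx ≠ -1 ∧ iy ≠ -1 ∧ idy ≠ -1 then (ix, idx, iy, idy)
    else
      let labale := pvLabel line
      if labale = "x" ∧ ix = -1 then pvALoop rest i idx iy idy
      else if labale = "dx" ∧ idx = -1 then pvALoop rest ix i iy idy
      else if labale = "y" ∧ iy = -1 then pvALoop rest ix idx i idy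
      else if labale = "dy" ∧ idy = -1 then pvALoop rest ix idx iy i
      else pvALoop rest ix idx iy idy

def pvEnumFrom (k : Nat) : List (List String) → List (Int × List String)
  | [] => []
  | l :: ls => ((k : Int), l) :: pvEnumFrom (k + 1) ls

def revile_indexes (lines_vars : List (List String)) : Int × Int × Int × Int :=
  pvALoop (pvEnumFrom 0 lines_vars) (-1) (-1) (-1) (-1)

-- ===== PORT B =====
-- next((i for i, line in enumerate(lines_vars) if line[0].lower() == label), -1)
def pvFirst (label : String) : List (List String) → Nat → Int
  | [], _ => -1
  | line :: rest, i => if pvLabel line = label then (i : Int) else pvFirst label rest (i + 1)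

def revile_indexes_alt (lines_vars : List (List String)) : Int × Int × Int × Int :=
  (pvFirst "x" lines_vars 0, pvFirst "dx" lines_vars 0,
   pvFirst "y" lines_vars 0, pvFirst "dy" lines_vars 0)

-- ===== PRECONDITION & SPEC =====
-- Python A (and B) raise IndexError on `line[0]` exactly when the FIRST empty inner list comes
-- before some label's first occurrence; Pre_ excludes exactly those inputs (A raises there).
def Pre_revile_indexes (lines_vars : List (List String)) : Prop :=
  ∀ i : Fin lines_vars.length,
    (lines_vars.get i = [] ∧ ∀ j : Fin lines_vars.length, j.val < i.val → lines_vars.get j ≠ []) →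
    ∀ L ∈ (["x", "dx", "y", "dy"] : List String),
      ∃ j : Fin lines_vars.length, j.val < i.val ∧
        (lines_vars.get j).head?.map PySem.Str.lower = some L
instance (lines_vars : List (List String)) : Decidable (Pre_revile_indexes lines_vars) := by
  unfold Pre_revile_indexes; infer_instance

def pvWitness_revile_indexes : List (List String) := [["x", "1"], ["dX"], ["y"], ["dy"], []]

def Spec_revile_indexes (lines_vars : List (List String)) (out : Int × Int × Int × Int) : Prop := out = revile_indexes_alt lines_vars
instance (lines_vars : List (List String)) (out : Int × Int × Int × Int) : Decidable (Spec_revile_indexes lines_vars out) := by unfold Spec_revile_indexes; infer_instance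

-- ===== CLAIM (what is proved, stated in full; the proofs are below) =====
def Claim_equal_revile_indexes : Prop := ∀ (lines_vars : List (List String)), Dom_revile_indexes lines_vars → Pre_revile_indexes lines_vars → Spec_revile_indexes lines_vars (revile_indexes lines_vars)

-- ===== LEMMAS AND PROOFS =====

-- the fused loop computes, per component, "keep the accumulator if set, else the first match"
theorem pvALoop_eq (lv : List (List String)) : ∀ (k : Nat) (ix idx iy idy : Int),
    pvALoop (pvEnumFrom k lv) ix idx iy idy =
      ((if ix = -1 then pvFirst "x" lv k else ix),
       (if idx = -1 then pvFirst "dx" lv k else idx),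
       (if iy = -1 then pvFirst "y" lv k else iy),
       (if idy = -1 then pvFirst "dy" lv k else idy)) := by
  induction lv with
  | nil =>
      intro k ix idx iy idy
      simp only [pvEnumFrom, pvALoop, pvFirst]
      split_ifs <;> simp_all
  | cons line rest ih =>
      intro k ix idx iy idy
      have hk : (k : Int) ≠ -1 := by omega
      simp only [pvEnumFrom, pvALoop, pvFirst]
      by_cases hall : ix ≠ -1 ∧ idx ≠ -1 ∧ iy ≠ -1 ∧ idy ≠ -1
      · simp [hall]
      · simp only [if_neg hall]
        by_cases h1 : pvLabel line = "x" ∧ ix = -1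
        · rw [if_pos h1, ih]
          simp [h1.1, h1.2, hk]
        · rw [if_neg h1]
          by_cases h2 : pvLabel line = "dx" ∧ idx = -1
          · rw [if_pos h2, ih]
            simp [h2.1, h2.2, hk]
          · rw [if_neg h2]
            by_cases h3 : pvLabel line = "y" ∧ iy = -1
            · rw [if_pos h3, ih]
              simp [h3.1, h3.2, hk]
            · rw [if_neg h3]
              by_cases h4 : pvLabel line = "dy" ∧ idy = -1
              · rw [if_pos h4, ih]
                simp [h4.1, h4.2, hk]
              · rw [if_neg h4, ih]
                -- none of the four branches fired: each component's "match here" case is impossible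
                congr 1
                · by_cases hix : ix = -1
                  · have : pvLabel line ≠ "x" := fun h => h1 ⟨h, hix⟩
                    simp [hix, this]
                  · simp [hix]
                congr 1
                · by_cases hidx : idx = -1
                  · have : pvLabel line ≠ "dx" := fun h => h2 ⟨h, hidx⟩
                    simp [hidx, this]
                  · simp [hidx]
                congr 1
                · by_cases hiy : iy = -1
                  · have : pvLabel line ≠ "y" := fun h => h3 ⟨h, hiy⟩
                    simp [hiy, this]
                  · simp [hiy]
                · by_cases hidy : idy = -1
                  · have : pvLabel line ≠ "dy" := fun h => h4 ⟨h, hidy⟩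
                    simp [hidy, this]
                  · simp [hidy]

-- ===== VERDICT (by name: the statement is the Claim_ definition above) =====
theorem revile_indexes_spec : Claim_equal_revile_indexes := by
  intro lv _ _
  unfold Spec_revile_indexes revile_indexes revile_indexes_alt
  rw [pvALoop_eq]
  simp
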